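-- pv_equiv track=rewrite | github.com/jamesfalkner/showroom | backend/app.py | _extract_adoc_title
-- ===== SOURCE A (Python) =====
-- def _extract_adoc_title(content: str, fallback: str) -> str:
--     """Extract title from AsciiDoc content"""
--     lines = content.split('\n')
--     for line in lines:
--         line = line.strip()
--         # Look for main title (= Title) or section title (== Title)
--         if line.startswith('= ') and not line.startswith('== '):
--             return line[2:].strip()
--         elif line.startswith('== '):
--             return line[3:].strip()
--     return fallback.replace('-', ' ').title()
-- ===== SOURCE B (Python) =====
-- def _extract_adoc_title(content: str, fallback: str) -> str:
--     """Extract title from AsciiDoc content via a single index-based scan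
--     (no split/strip allocations): at each line start skip blanks, count the
--     run of '=', and accept a level-1/2 marker followed by a space and a
--     non-blank title."""
--     blank = ' \t\r'
--     n = len(content)
--     i = 0
--     while True:
--         j = i
--         while j < n and content[j] in blank:
--             j += 1
--         k = j
--         while k < n and content[k] == '=':
--             k += 1
--         d = k - j
--         if (d == 1 or d == 2) and k < n and content[k] == ' ':
--             end = k
--             while end < n and content[end] != '\n':
--                 end += 1
--             e = k + 1
--             while e < end and content[e] in blank:
--                 e += 1
--             t = end
--             while t > e and content[t - 1] in blank:
--                 t -= 1
--             if e < t:
--                 return content[e:t]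
--         while i < n and content[i] != '\n':
--             i += 1
--         if i == n:
--             break
--         i += 1
--     return fallback.replace('-', ' ').title()
-- ===== Notes on version B (the rewrite author's own statement) =====
-- stated objective: alternative
-- what changed: Replaces A's split('\n')/strip()/startswith() line-list pipeline by a single index-based scan over the raw string that skips blanks, counts the run of '=' at each line start and slices the title out in place, allocating no line list and no stripped copies.
import Mathlib
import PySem

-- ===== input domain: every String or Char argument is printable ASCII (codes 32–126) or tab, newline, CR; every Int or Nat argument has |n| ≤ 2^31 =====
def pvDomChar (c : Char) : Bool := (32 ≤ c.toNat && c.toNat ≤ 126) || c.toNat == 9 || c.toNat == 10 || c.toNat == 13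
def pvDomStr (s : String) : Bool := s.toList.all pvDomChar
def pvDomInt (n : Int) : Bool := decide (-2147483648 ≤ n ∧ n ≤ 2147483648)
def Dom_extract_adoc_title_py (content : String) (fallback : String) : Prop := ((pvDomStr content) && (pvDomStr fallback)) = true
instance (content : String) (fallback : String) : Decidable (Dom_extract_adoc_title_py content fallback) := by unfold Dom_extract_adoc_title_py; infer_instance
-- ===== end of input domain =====

-- B replaces A's split/strip/startswith line loop by a single index-based scan of the
-- content (skip blanks, count the '=' run, slice the title in place): an alternative
-- implementation of the same task, proved equal to A on the ASCII domain.

-- hand port of str.title(), exact on the ASCII domain (there a cased character is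
-- exactly a letter, so a word starts at a letter preceded by a non-letter); used by
-- both ports for A's and B's identical fallback expression
-- `fallback.replace('-', ' ').title()`
def pvTitleGo : List Char → Bool → List Char
  | [], _ => []
  | c :: cs, prev =>
    (if PySem.Chars.isalpha c then
       (if prev then PySem.Chars.lowerChar c else PySem.Chars.upperChar c)
     else c) :: pvTitleGo cs (PySem.Chars.isalpha c)

def pvTitle (s : String) : String := String.ofList (pvTitleGo s.toList false)

-- ===== PORT A =====
-- `for line in content.split('\n'): …` with the early returns, else the fallback
def pvLinesLoopA : List String → String → String
  | [], fallback => pvTitle (PySem.Str.replace fallback "-" " ")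
  | line :: lines, fallback =>
    let l := PySem.Str.strip line
    if PySem.Str.startswith l "= " && !(PySem.Str.startswith l "== ") then
      PySem.Str.strip (PySem.Str.slice l (some 2) none)
    else if PySem.Str.startswith l "== " then
      PySem.Str.strip (PySem.Str.slice l (some 3) none)
    else pvLinesLoopA lines fallback

def extract_adoc_title_py (content : String) (fallback : String) : String :=
  pvLinesLoopA ((PySem.Str.split? content "\n").getD []) fallback

-- ===== PORT B =====
-- the blank set `' \t\r'` of Source B
def pvBlank (c : Char) : Bool := c == ' ' || c == '\t' || c == '\r'

-- `while j < b and content[j] in blank: j += 1`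
def pvSkipBlank (cs : List Char) (b : Nat) (j : Nat) : Nat :=
  if h : j < b ∧ (cs[j]?.any pvBlank) = true then pvSkipBlank cs b (j + 1) else j
termination_by b - j
decreasing_by omega

-- `while k < n and content[k] == '=': k += 1`
def pvEqRun (cs : List Char) (k : Nat) : Nat :=
  if h : k < cs.length ∧ cs[k]? = some '=' then pvEqRun cs (k + 1) else k
termination_by cs.length - k
decreasing_by omega

-- `while i < n and content[i] != '\n': i += 1`
def pvFindNl (cs : List Char) (i : Nat) : Nat :=
  if h : i < cs.length ∧ cs[i]? ≠ some '\n' then pvFindNl cs (i + 1) else i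
termination_by cs.length - i
decreasing_by omega

-- cited by pvScanB's termination proof
theorem pvFindNl_ge (cs : List Char) (i : Nat) : i ≤ pvFindNl cs i := by
  unfold pvFindNl
  split
  · exact Nat.le_trans (Nat.le_succ i) (pvFindNl_ge cs (i + 1))
  · exact Nat.le_refl i
termination_by cs.length - i
decreasing_by omega

-- `while t > e and content[t-1] in blank: t -= 1`
def pvTrimBack (cs : List Char) (e : Nat) (t : Nat) : Nat :=
  if h : e < t ∧ (cs[t - 1]?.any pvBlank) = true then pvTrimBack cs e (t - 1) else t
termination_by t
decreasing_by omega

-- the `while True` line scan of Source B, one recursive step per line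
def pvScanB (cs : List Char) (i : Nat) : Option (List Char) :=
  let n := cs.length
  let j := pvSkipBlank cs n i
  let k := pvEqRun cs j
  let d := k - j
  let hit : Option (List Char) :=
    if (d == 1 || d == 2) && (cs[k]? == some ' ') then
      let endl := pvFindNl cs k
      let e := pvSkipBlank cs endl (k + 1)
      let t := pvTrimBack cs e endl
      -- `if e < t: return content[e:t]`
      if e < t then some (PySem.List.slice cs (some (e : Int)) (some (t : Int))) else none
    else none
  match hit with
  | some r => some r
  | none =>
    let i' := pvFindNl cs i
    -- in every reachable state i ≤ i' ≤ n, so `i' < n` is Python's `if i == n: break`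
    if _h : i' < n then pvScanB cs (i' + 1) else none
termination_by cs.length + 1 - i
decreasing_by
  have := pvFindNl_ge cs i; omega

def extract_adoc_title_py_alt (content : String) (fallback : String) : String :=
  match pvScanB content.toList 0 with
  | some t => String.ofList t
  | none => pvTitle (PySem.Str.replace fallback "-" " ")

-- ===== PRECONDITION & SPEC =====
def Spec_extract_adoc_title_py (content : String) (fallback : String) (out : String) : Prop := out = extract_adoc_title_py_alt content fallback
instance (content : String) (fallback : String) (out : String) : Decidable (Spec_extract_adoc_title_py content fallback out) := by unfold Spec_extract_adoc_title_py; infer_instance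

-- ===== CLAIM (what is proved, stated in full; the proofs are below) =====
def Claim_equal_extract_adoc_title_py : Prop := ∀ (content : String) (fallback : String), Dom_extract_adoc_title_py content fallback → Spec_extract_adoc_title_py content fallback (extract_adoc_title_py content fallback)

-- ===== LEMMAS AND PROOFS =====

-- ---- character facts ----
-- ---- character facts ----

theorem char_eq_iff_toNat (c d : Char) : c = d ↔ c.toNat = d.toNat :=
  ⟨fun h => h ▸ rfl, fun h => by rw [← Char.ofNat_toNat c, h, Char.ofNat_toNat]⟩

theorem pvBlank_isspace (c : Char) (hd : pvDomChar c = true) (hnl : c ≠ '\n') :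
    PySem.Chars.isspace c = pvBlank c := by
  have h10 : c.toNat ≠ 10 := fun h => hnl ((char_eq_iff_toNat c '\n').mpr (by rw [h]; decide))
  have hdom := hd
  simp only [pvDomChar, Bool.or_eq_true, Bool.and_eq_true, decide_eq_true_eq,
    beq_iff_eq] at hdom
  have e1 : (' ' : Char).toNat = 32 := by decide
  have e2 : ('\t' : Char).toNat = 9 := by decide
  have e3 : ('\r' : Char).toNat = 13 := by decide
  have hiff : (PySem.Chars.isspace c = true) ↔ (pvBlank c = true) := by
    simp only [PySem.Chars.isspace, pvBlank, Bool.or_eq_true, Bool.and_eq_true,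
      decide_eq_true_eq, beq_iff_eq, char_eq_iff_toNat, e1, e2, e3]
    omega
  cases hs : PySem.Chars.isspace c <;> cases hb : pvBlank c <;> simp_all

-- ---- generic list mini-lemmas ----

theorem dropWhile_congr' {α : Type} (p q : α → Bool) (l : List α)
    (h : ∀ a ∈ l, p a = q a) : l.dropWhile p = l.dropWhile q := by
  induction l with
  | nil => rfl
  | cons a l ih =>
    have ha := h a (List.mem_cons_self ..)
    by_cases hp : p a = true
    · rw [List.dropWhile_cons_of_pos hp, List.dropWhile_cons_of_pos (ha ▸ hp),
        ih (fun b hb => h b (List.mem_cons_of_mem _ hb))]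
    · rw [List.dropWhile_cons_of_neg hp, List.dropWhile_cons_of_neg (ha ▸ hp)]

theorem head_dropWhile_neg {α : Type} (p : α → Bool) (u : List α) (a : α)
    (h : (u.dropWhile p).head? = some a) : p a = false := by
  induction u with
  | nil => simp at h
  | cons b u ih =>
    by_cases hb : p b = true
    · rw [List.dropWhile_cons_of_pos hb] at h; exact ih h
    · rw [List.dropWhile_cons_of_neg hb] at h
      simp only [List.head?_cons, Option.some.injEq] at h
      subst h
      simpa using hb

theorem prefix_head {α : Type} {y z : List α} (h : y <+: z) (hy : y ≠ []) :
    y.head? = z.head? := by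
  obtain ⟨t, rfl⟩ := h
  cases y with
  | nil => exact absurd rfl hy
  | cons a y => simp

theorem drop_cons_of_getElem? {α : Type} (cs : List α) (j : Nat) (c : α)
    (h : cs[j]? = some c) : cs.drop j = c :: cs.drop (j + 1) := by
  obtain ⟨hlt, hv⟩ := List.getElem?_eq_some_iff.mp h
  rw [List.drop_eq_getElem_cons hlt]
  exact congrArg (· :: cs.drop (j + 1)) hv

theorem drop_append_left_plus {α : Type} (xs ys : List α) (k : Nat) :
    List.drop (xs.length + k) (xs ++ ys) = List.drop k ys := by
  rw [List.drop_append, List.drop_eq_nil_of_le (by omega)]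
  simp

theorem dropWhile_idem' {α : Type} (p : α → Bool) (u : List α) :
    List.dropWhile p (List.dropWhile p u) = List.dropWhile p u := by
  induction u with
  | nil => rfl
  | cons a u ih =>
    by_cases hp : p a = true
    · rw [List.dropWhile_cons_of_pos hp, ih]
    · rw [List.dropWhile_cons_of_neg hp, List.dropWhile_cons_of_neg hp]

theorem rdropWhile_cons_neg {α : Type} (p : α → Bool) (a : α) (u : List α)
    (h : p a = false) : List.rdropWhile p (a :: u) = a :: List.rdropWhile p u := by
  simp only [List.rdropWhile, List.reverse_cons, List.dropWhile_append]
  split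
  · rename_i hemp
    have h1 : List.dropWhile p u.reverse = [] := by
      simpa [List.isEmpty_iff] using hemp
    have h2 : List.dropWhile p [a] = [a] := by
      rw [show ([a] : List α) = a :: [] from rfl,
        List.dropWhile_cons_of_neg (by simp [h])]
    rw [h1, h2]
    simp
  · simp

theorem rdropWhile_cons_pos {α : Type} (p : α → Bool) (a : α) (u : List α)
    (h : p a = true) :
    List.rdropWhile p (a :: u) =
      if List.rdropWhile p u = [] then [] else a :: List.rdropWhile p u := by
  simp only [List.rdropWhile, List.reverse_cons, List.dropWhile_append]
  have hiff : (List.dropWhile p u.reverse).isEmpty = true ↔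
      (List.dropWhile p u.reverse).reverse = [] := by
    simp [List.isEmpty_iff]
  have h2 : List.dropWhile p [a] = ([] : List α) := by
    rw [show ([a] : List α) = a :: [] from rfl, List.dropWhile_cons_of_pos h]
    rfl
  split
  · rename_i hemp
    rw [if_pos (hiff.mp hemp), h2]
    rfl
  · rename_i hemp
    rw [if_neg (fun hc => hemp (hiff.mpr hc))]
    simp

theorem rdropWhile_dropWhile_comm {α : Type} (p : α → Bool) (u : List α) :
    List.dropWhile p (List.rdropWhile p u) = List.rdropWhile p (List.dropWhile p u) := by
  induction u with
  | nil => simp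
  | cons a u ih =>
    by_cases hp : p a = true
    · rw [rdropWhile_cons_pos p a u hp, List.dropWhile_cons_of_pos hp]
      split
      · rename_i hz
        have hall := List.rdropWhile_eq_nil_iff.mp hz
        rw [List.dropWhile_eq_nil_iff.mpr hall]
        simp
      · rw [List.dropWhile_cons_of_pos hp]
        exact ih
    · have hp' : p a = false := by simpa using hp
      rw [rdropWhile_cons_neg p a u hp', List.dropWhile_cons_of_neg hp,
        List.dropWhile_cons_of_neg hp, rdropWhile_cons_neg p a u hp']

theorem rdropWhile_idem {α : Type} (p : α → Bool) (u : List α) :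
    List.rdropWhile p (List.rdropWhile p u) = List.rdropWhile p u := by
  simp only [List.rdropWhile, List.reverse_reverse]
  rw [dropWhile_idem']

theorem rdropWhile_append_of_neg {α : Type} (p : α → Bool) (q u : List α)
    (hq : ∀ a ∈ q, p a = false) :
    List.rdropWhile p (q ++ u) = q ++ List.rdropWhile p u := by
  induction u using List.reverseRecOn with
  | nil =>
    have h : List.rdropWhile p q = q :=
      List.rdropWhile_eq_self_iff.mpr (fun hl => by simp [hq _ (List.getLast_mem hl)])
    simpa using h
  | append_singleton u a ih =>
    by_cases hp : p a = true
    · rw [← List.append_assoc, List.rdropWhile_concat_pos p _ a hp,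
        List.rdropWhile_concat_pos p _ a hp, ih]
    · rw [← List.append_assoc, List.rdropWhile_concat_neg p _ a hp,
        List.rdropWhile_concat_neg p _ a hp, List.append_assoc]

theorem rdrop_dropWhile_nil_iff {α : Type} (p : α → Bool) (u : List α) :
    List.rdropWhile p (List.dropWhile p u) = [] ↔ List.rdropWhile p u = [] := by
  rw [List.rdropWhile_eq_nil_iff, List.rdropWhile_eq_nil_iff]
  constructor
  · intro h x hx
    by_cases hpx : p x = true
    · exact hpx
    · refine h x ?_
      have hsplit : List.takeWhile p u ++ List.dropWhile p u = u :=
        List.takeWhile_append_dropWhile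
      rcases List.mem_append.mp (hsplit ▸ hx) with h1 | h1
      · exact absurd (List.mem_takeWhile_imp h1) hpx
      · exact h1
  · intro h x hx
    exact h x ((List.dropWhile_sublist p).subset hx)

theorem isPrefixOf_false_of_head (y : List Char) (c : Char) (cs' : List Char)
    (h : y.head? ≠ some c) : List.isPrefixOf (c :: cs') y = false := by
  cases y with
  | nil => rfl
  | cons a y' =>
    have hac : (c == a) = false := by
      have hne : c ≠ a := fun he => h (by simp [he.symm])
      simpa using hne
    simp [List.isPrefixOf, hac]

theorem takeWhile_length_le {α : Type} (p : α → Bool) (l : List α) :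
    (l.takeWhile p).length ≤ l.length :=
  (List.takeWhile_prefix p).length_le

theorem drop_takeWhile_length {α : Type} (p : α → Bool) (u : List α) :
    u.drop (u.takeWhile p).length = u.dropWhile p := by
  induction u with
  | nil => rfl
  | cons a l ih =>
    by_cases hp : p a = true
    · rw [List.takeWhile_cons_of_pos hp, List.dropWhile_cons_of_pos hp,
        List.length_cons, List.drop_succ_cons]
      exact ih
    · rw [List.takeWhile_cons_of_neg hp, List.dropWhile_cons_of_neg hp]
      rfl

-- strip on a newline-free stretch of domain characters is blank-trimming on both ends
theorem strip_dom (x : List Char) (hd : ∀ c ∈ x, pvDomChar c = true) (hnl : '\n' ∉ x) :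
    PySem.Chars.strip x = List.rdropWhile pvBlank (List.dropWhile pvBlank x) := by
  have hx : ∀ c ∈ x, PySem.Chars.isspace c = pvBlank c :=
    fun c hc => pvBlank_isspace c (hd c hc) (fun h => hnl (h ▸ hc))
  show PySem.Chars.rstrip (PySem.Chars.lstrip x) = _
  simp only [PySem.Chars.rstrip, PySem.Chars.lstrip, List.rdropWhile]
  rw [dropWhile_congr' _ _ x hx]
  congr 1
  apply dropWhile_congr'
  intro a ha
  exact hx a ((List.dropWhile_sublist pvBlank).subset (List.mem_reverse.mp ha))

-- ---- closed forms of Source B's four inner while loops ----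

theorem pvSkipBlank_spec (cs : List Char) (b j : Nat) :
    pvSkipBlank cs b j = j + (((cs.drop j).take (b - j)).takeWhile pvBlank).length := by
  unfold pvSkipBlank
  split
  · rename_i h
    obtain ⟨hjb, hany⟩ := h
    obtain ⟨c, hc, hbc⟩ := (Option.any_eq_true _ _).mp hany
    rw [pvSkipBlank_spec cs b (j + 1)]
    rw [drop_cons_of_getElem? cs j c hc]
    have hbj : b - j = (b - (j + 1)) + 1 := by omega
    rw [hbj, List.take_succ_cons, List.takeWhile_cons_of_pos hbc]
    simp only [List.length_cons]
    omega
  · rename_i h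
    by_cases hjb : j < b
    · cases hc : cs[j]? with
      | none =>
        rw [List.drop_eq_nil_of_le (List.getElem?_eq_none_iff.mp hc)]
        simp
      | some c =>
        have hbc : pvBlank c = false := by
          by_contra hcon
          exact h ⟨hjb, (Option.any_eq_true _ _).mpr ⟨c, hc, by simpa using hcon⟩⟩
        rw [drop_cons_of_getElem? cs j c hc]
        have hbj : b - j = (b - (j + 1)) + 1 := by omega
        rw [hbj, List.take_succ_cons, List.takeWhile_cons_of_neg (by simp [hbc])]
        simp
    · have hb0 : b - j = 0 := by omega
      simp [hb0]
termination_by b - j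

theorem pvEqRun_spec (cs : List Char) (k : Nat) :
    pvEqRun cs k = k + ((cs.drop k).takeWhile (fun c => c == '=')).length := by
  unfold pvEqRun
  split
  · rename_i h
    obtain ⟨hlt, hc⟩ := h
    rw [pvEqRun_spec cs (k + 1)]
    rw [drop_cons_of_getElem? cs k '=' hc,
      List.takeWhile_cons_of_pos (by decide)]
    simp only [List.length_cons]
    omega
  · rename_i h
    by_cases hlt : k < cs.length
    · cases hc : cs[k]? with
      | none =>
        have := List.getElem?_eq_none_iff.mp hc
        omega
      | some c =>
        have hcne : c ≠ '=' := by
          intro hcon; exact h ⟨hlt, by rw [hc, hcon]⟩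
        rw [drop_cons_of_getElem? cs k c hc,
          List.takeWhile_cons_of_neg (by simp [hcne])]
        simp
    · rw [List.drop_eq_nil_of_le (by omega)]
      simp
termination_by cs.length - k

theorem pvFindNl_spec (cs : List Char) (i : Nat) :
    pvFindNl cs i = i + ((cs.drop i).takeWhile (fun c => c != '\n')).length := by
  unfold pvFindNl
  split
  · rename_i h
    obtain ⟨hlt, hc⟩ := h
    have hcv : cs[i]? = some cs[i] := List.getElem?_eq_getElem hlt
    have hne : cs[i] ≠ '\n' := fun hcon => hc (by rw [hcv, hcon])
    rw [pvFindNl_spec cs (i + 1)]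
    rw [drop_cons_of_getElem? cs i cs[i] hcv,
      List.takeWhile_cons_of_pos (by simp [hne])]
    simp only [List.length_cons]
    omega
  · rename_i h
    by_cases hlt : i < cs.length
    · have hcv : cs[i]? = some cs[i] := List.getElem?_eq_getElem hlt
      have heq : cs[i] = '\n' := by
        by_contra hcon
        exact h ⟨hlt, fun hcc => hcon (Option.some.inj (hcv.symm.trans hcc))⟩
      rw [drop_cons_of_getElem? cs i cs[i] hcv,
        List.takeWhile_cons_of_neg (by simp [heq])]
      simp
    · rw [List.drop_eq_nil_of_le (by omega)]
      simp
termination_by cs.length - i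

theorem pvTrimBack_spec (cs : List Char) (e t : Nat) (ht : t ≤ cs.length) (het : e ≤ t) :
    pvTrimBack cs e t = e + (((cs.take t).drop e).rdropWhile pvBlank).length := by
  unfold pvTrimBack
  split
  · rename_i h
    obtain ⟨hlt, hany⟩ := h
    obtain ⟨c, hc, hbc⟩ := (Option.any_eq_true _ _).mp hany
    rw [pvTrimBack_spec cs e (t - 1) (by omega) (by omega)]
    have htake : cs.take t = cs.take (t - 1) ++ [c] := by
      have h1 : t = (t - 1) + 1 := by omega
      have h2 := List.take_succ (l := cs) (i := t - 1)
      rw [← h1] at h2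
      rw [h2, hc]
      rfl
    rw [htake, List.drop_append_of_le_length (by simp [List.length_take]; omega),
      List.rdropWhile_concat_pos _ _ _ hbc]
  · rename_i h
    by_cases he : e < t
    · have hlt : t - 1 < cs.length := by omega
      have hcv : cs[t - 1]? = some cs[t - 1] := List.getElem?_eq_getElem hlt
      have hbc : pvBlank cs[t - 1] = false := by
        by_contra hcon
        exact h ⟨he, (Option.any_eq_true _ _).mpr ⟨_, hcv, by simpa using hcon⟩⟩
      have htake : cs.take t = cs.take (t - 1) ++ [cs[t - 1]] := by
        have h1 : t = (t - 1) + 1 := by omega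
        have h2 := List.take_succ (l := cs) (i := t - 1)
        rw [← h1] at h2
        rw [h2, hcv]
        rfl
      rw [htake, List.drop_append_of_le_length (by simp [List.length_take]; omega),
        List.rdropWhile_concat_neg _ _ _ (by simp [hbc])]
      simp only [List.length_append, List.length_drop, List.length_take,
        List.length_cons, List.length_nil]
      omega
    · have he' : e = t := by omega
      subst he'
      rw [List.drop_eq_nil_of_le (by simp only [List.length_take]; omega)]
      simp
termination_by t

-- ---- the scan ignores an already-consumed prefix ----

theorem pvScanB_shift (x cs : List Char) (i : Nat) :
    pvScanB (x ++ cs) (x.length + i) = pvScanB cs i := by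
  have hdropX : ∀ j : Nat, (x ++ cs).drop (x.length + j) = cs.drop j := by
    intro j
    rw [List.drop_append, List.drop_eq_nil_of_le (by omega)]
    simp
  have hgetX : ∀ j : Nat, (x ++ cs)[x.length + j]? = cs[j]? := by
    intro j
    rw [List.getElem?_append_right (by omega)]
    congr 1
    omega
  have hskip : ∀ b j : Nat, pvSkipBlank (x ++ cs) (x.length + b) (x.length + j)
      = x.length + pvSkipBlank cs b j := by
    intro b j
    rw [pvSkipBlank_spec, pvSkipBlank_spec, hdropX]
    have h1 : x.length + b - (x.length + j) = b - j := by omega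
    rw [h1]
    omega
  have heqr : ∀ j : Nat, pvEqRun (x ++ cs) (x.length + j) = x.length + pvEqRun cs j := by
    intro j
    rw [pvEqRun_spec, pvEqRun_spec, hdropX]
    omega
  have hfnl : ∀ j : Nat, pvFindNl (x ++ cs) (x.length + j) = x.length + pvFindNl cs j := by
    intro j
    rw [pvFindNl_spec, pvFindNl_spec, hdropX]
    omega
  have htrim : ∀ e t : Nat, pvTrimBack (x ++ cs) (x.length + e) (x.length + t)
      = x.length + pvTrimBack cs e t := by
    intro e t
    induction t using Nat.strong_induction_on with
    | _ t ihh =>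
      by_cases hg : e < t ∧ (cs[t - 1]?.any pvBlank) = true
      · have ht1 : 1 ≤ t := by omega
        have hidx : (x ++ cs)[x.length + t - 1]? = cs[t - 1]? := by
          have h0 := hgetX (t - 1)
          have h1 : x.length + t - 1 = x.length + (t - 1) := by omega
          rw [h1, h0]
        rw [pvTrimBack.eq_def (x ++ cs) (x.length + e) (x.length + t),
          pvTrimBack.eq_def cs e t,
          dif_pos (show x.length + e < x.length + t
              ∧ ((x ++ cs)[x.length + t - 1]?.any pvBlank) = true from
            ⟨by omega, by rw [hidx]; exact hg.2⟩),
          dif_pos hg]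
        have h1 : x.length + t - 1 = x.length + (t - 1) := by omega
        rw [h1, ihh (t - 1) (by omega)]
      · have hside : ¬ (x.length + e < x.length + t
            ∧ ((x ++ cs)[x.length + t - 1]?.any pvBlank) = true) := by
          intro hcon
          apply hg
          refine ⟨by omega, ?_⟩
          have ht1 : 1 ≤ t := by omega
          have hidx : (x ++ cs)[x.length + t - 1]? = cs[t - 1]? := by
            have h0 := hgetX (t - 1)
            have h1 : x.length + t - 1 = x.length + (t - 1) := by omega
            rw [h1, h0]
          rw [← hidx]
          exact hcon.2
        rw [pvTrimBack.eq_def (x ++ cs) (x.length + e) (x.length + t),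
          pvTrimBack.eq_def cs e t, dif_neg hside, dif_neg hg]
  have hslice : ∀ e t : Nat,
      PySem.List.slice (x ++ cs) (some ((x.length + e : Nat) : Int)) (some ((x.length + t : Nat) : Int))
        = PySem.List.slice cs (some (e : Int)) (some (t : Int)) := by
    intro e t
    rw [PySem.List.slice_natCast, PySem.List.slice_natCast, hdropX]
    congr 1
    omega
  by_cases hi : i ≤ cs.length
  · have hIH : pvScanB (x ++ cs) (x.length + (pvFindNl cs i + 1)) = pvScanB cs (pvFindNl cs i + 1) :=
      pvScanB_shift x cs (pvFindNl cs i + 1)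
    rw [pvScanB.eq_def (x ++ cs) (x.length + i), pvScanB.eq_def cs i]
    dsimp only
    simp only [List.length_append, hskip, heqr, hfnl, hgetX, htrim, hslice, hIH,
      Nat.add_sub_add_left, Nat.add_lt_add_iff_left, Nat.add_assoc]
  · have hj0 : pvSkipBlank cs cs.length i = i := by
      rw [pvSkipBlank_spec]
      have h0 : cs.length - i = 0 := by omega
      rw [h0]
      simp
    have hk0 : pvEqRun cs i = i := by
      rw [pvEqRun_spec, List.drop_eq_nil_of_le (by omega)]
      simp
    have hf0 : pvFindNl cs i = i := by
      rw [pvFindNl_spec, List.drop_eq_nil_of_le (by omega)]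
      simp
    rw [pvScanB.eq_def (x ++ cs) (x.length + i), pvScanB.eq_def cs i]
    dsimp only
    simp only [List.length_append, hskip, heqr, hfnl, hgetX, htrim, hslice, hj0, hk0, hf0,
      Nat.add_sub_add_left, Nat.add_lt_add_iff_left, Nat.add_assoc, Nat.sub_self,
      show ((0 : Nat) == 1 || (0 : Nat) == 2) = false from rfl, Bool.false_and,
      Bool.false_eq_true, if_false]
    rw [dif_neg (by omega), dif_neg (by omega)]
termination_by cs.length + 1 - i
decreasing_by
  have := pvFindNl_ge cs i; omega

-- ---- the per-line verdict both programs agree on ----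

-- verdict of one line, phrased on the blank-lstripped line m
def pvHitM (m : List Char) : Option (List Char) :=
  if ((m.takeWhile (fun c => c == '=')).length = 1 ∨ (m.takeWhile (fun c => c == '=')).length = 2)
      ∧ m[(m.takeWhile (fun c => c == '=')).length]? = some ' ' then
    if List.rdropWhile pvBlank (List.dropWhile pvBlank
        (m.drop ((m.takeWhile (fun c => c == '=')).length + 1))) = [] then none
    else some (List.rdropWhile pvBlank (List.dropWhile pvBlank
        (m.drop ((m.takeWhile (fun c => c == '=')).length + 1))))
  else none

-- the same verdict with the '=' run already split off
def pvHitR (d : Nat) (rest : List Char) : Option (List Char) :=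
  if (d = 1 ∨ d = 2) ∧ rest.head? = some ' ' then
    if List.rdropWhile pvBlank (List.dropWhile pvBlank (rest.drop 1)) = [] then none
    else some (List.rdropWhile pvBlank (List.dropWhile pvBlank (rest.drop 1)))
  else none

-- A's per-line test/result on the char level
def pvLineHit (l : List Char) : Option (List Char) :=
  if PySem.Chars.startswith (PySem.Chars.strip l) ['=', ' ']
      && !(PySem.Chars.startswith (PySem.Chars.strip l) ['=', '=', ' ']) then
    some (PySem.Chars.strip ((PySem.Chars.strip l).drop 2))
  else if PySem.Chars.startswith (PySem.Chars.strip l) ['=', '=', ' '] then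
    some (PySem.Chars.strip ((PySem.Chars.strip l).drop 3))
  else none

def pvLoopC : List (List Char) → Option (List Char)
  | [] => none
  | l :: ls =>
    match pvLineHit l with
    | some t => some t
    | none => pvLoopC ls

theorem replicate_takeWhile_eq (d : Nat) (rest : List Char)
    (hrh : ∀ a, rest.head? = some a → (a == '=') = false) :
    (List.replicate d '=' ++ rest).takeWhile (fun c => c == '=') = List.replicate d '=' := by
  rw [List.takeWhile_append_of_pos (by
    intro a ha
    simp [List.eq_of_mem_replicate ha])]
  cases rest with
  | nil => simp
  | cons c u =>
    have hc := hrh c rfl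
    rw [List.takeWhile_cons_of_neg (by simp [hc])]
    simp

theorem replicate_getElem_eq (d : Nat) (rest : List Char) :
    (List.replicate d '=' ++ rest)[d]? = rest.head? := by
  rw [List.getElem?_append_right (by simp)]
  simp [List.head?_eq_getElem?]

theorem replicate_drop_eq (d : Nat) (rest : List Char) :
    (List.replicate d '=' ++ rest).drop (d + 1) = rest.drop 1 := by
  rw [List.drop_append, List.drop_eq_nil_of_le (by simp)]
  have h1 : d + 1 - (List.replicate d '=' : List Char).length = 1 := by simp
  rw [h1]
  simp

theorem pvHitM_eq_R (d : Nat) (rest : List Char)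
    (hrh : ∀ a, rest.head? = some a → (a == '=') = false) :
    pvHitM (List.replicate d '=' ++ rest) = pvHitR d rest := by
  unfold pvHitM pvHitR
  simp only [replicate_takeWhile_eq d rest hrh, List.length_replicate,
    replicate_getElem_eq, replicate_drop_eq]

theorem pvHitM_eq_R' (m : List Char) :
    pvHitM m = pvHitR ((m.takeWhile (fun c => c == '=')).length)
      (m.dropWhile (fun c => c == '=')) := by
  have hrh : ∀ a, (m.dropWhile (fun c => c == '=')).head? = some a → (a == '=') = false :=
    fun a ha => head_dropWhile_neg _ _ a ha
  have hdec : m = List.replicate ((m.takeWhile (fun c => c == '=')).length) '='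
      ++ m.dropWhile (fun c => c == '=') := by
    conv_lhs => rw [← List.takeWhile_append_dropWhile (p := fun c => c == '=') (l := m)]
    congr 1
    refine List.eq_replicate_iff.mpr ⟨rfl, fun b hb => ?_⟩
    simpa using List.mem_takeWhile_imp hb
  conv_lhs => rw [hdec]
  exact pvHitM_eq_R _ _ hrh

-- the head of `rdropWhile` agrees with the head of the list, unless it is empty
theorem rdrop_head (rest : List Char) :
    List.rdropWhile pvBlank rest = [] ∨
      (List.rdropWhile pvBlank rest).head? = rest.head? := by
  cases hc : List.rdropWhile pvBlank rest with
  | nil => exact Or.inl rfl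
  | cons a w' =>
    refine Or.inr ?_
    rw [← hc]
    exact prefix_head (List.rdropWhile_prefix _ _) (by rw [hc]; simp)

-- A's tests on one decomposed line agree with pvHitR
theorem hitM_split (d : Nat) (rest : List Char)
    (hdm : ∀ c ∈ rest, pvDomChar c = true) (hnlm : '\n' ∉ rest)
    (hrh : ∀ a, rest.head? = some a → (a == '=') = false) :
    (if PySem.Chars.startswith (List.replicate d '=' ++ List.rdropWhile pvBlank rest) ['=', ' ']
        && !(PySem.Chars.startswith (List.replicate d '=' ++ List.rdropWhile pvBlank rest) ['=', '=', ' ']) then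
      some (PySem.Chars.strip ((List.replicate d '=' ++ List.rdropWhile pvBlank rest).drop 2))
    else if PySem.Chars.startswith (List.replicate d '=' ++ List.rdropWhile pvBlank rest) ['=', '=', ' '] then
      some (PySem.Chars.strip ((List.replicate d '=' ++ List.rdropWhile pvBlank rest).drop 3))
    else none) = pvHitR d rest := by
  have hwne : (List.rdropWhile pvBlank rest).head? ≠ some '=' := by
    rcases rdrop_head rest with h | h
    · rw [h]; simp
    · rw [h]
      intro hcon
      have := hrh '=' hcon
      simp at this
  rcases d with _ | (_ | (_ | d3))
  · -- d = 0 : the stripped line does not start with '='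
    have h1 : List.isPrefixOf ['=', ' '] (List.rdropWhile pvBlank rest) = false :=
      isPrefixOf_false_of_head _ _ _ hwne
    have h2 : List.isPrefixOf ['=', '=', ' '] (List.rdropWhile pvBlank rest) = false :=
      isPrefixOf_false_of_head _ _ _ hwne
    have hpR : pvHitR 0 rest = none := by
      unfold pvHitR
      rw [if_neg (by rintro ⟨h | h, -⟩ <;> omega)]
    rw [hpR]
    simp [PySem.Chars.startswith, List.replicate, h1, h2]
  · -- d = 1
    cases rest with
    | nil =>
      have hpR : pvHitR (0 + 1) ([] : List Char) = none := by
        unfold pvHitR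
        rw [if_neg (by rintro ⟨-, hc⟩; simp at hc)]
      rw [hpR]
      simp [PySem.Chars.startswith, List.isPrefixOf, List.rdropWhile, List.replicate]
    | cons c u =>
      by_cases hcsp : c = ' '
      · subst hcsp
        by_cases hz : List.rdropWhile pvBlank u = []
        · have hw : List.rdropWhile pvBlank (' ' :: u) = [] := by
            rw [rdropWhile_cons_pos _ _ _ (by decide), if_pos hz]
          have hz2 : List.rdropWhile pvBlank (List.dropWhile pvBlank u) = [] :=
            (rdrop_dropWhile_nil_iff pvBlank u).mpr hz
          have hpR : pvHitR (0 + 1) (' ' :: u) = none := by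
            unfold pvHitR
            rw [if_pos ⟨Or.inl rfl, rfl⟩,
              show ((' ' :: u : List Char).drop 1) = u from rfl, if_pos hz2]
          rw [hw, hpR]
          simp [PySem.Chars.startswith, List.isPrefixOf, List.replicate]
        · have hw : List.rdropWhile pvBlank (' ' :: u) = ' ' :: List.rdropWhile pvBlank u := by
            rw [rdropWhile_cons_pos _ _ _ (by decide), if_neg hz]
          have hz2 : List.rdropWhile pvBlank (List.dropWhile pvBlank u) ≠ [] :=
            fun hc => hz ((rdrop_dropWhile_nil_iff pvBlank u).mp hc)
          have hstrip : PySem.Chars.strip (List.rdropWhile pvBlank u)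
              = List.rdropWhile pvBlank (List.dropWhile pvBlank u) := by
            rw [strip_dom _ (fun a ha => hdm a
                (List.mem_cons_of_mem _ ((List.rdropWhile_prefix _ _).subset ha)))
              (fun ha => hnlm
                (List.mem_cons_of_mem _ ((List.rdropWhile_prefix _ _).subset ha)))]
            rw [rdropWhile_dropWhile_comm, rdropWhile_idem]
          have hpR : pvHitR (0 + 1) (' ' :: u)
              = some (List.rdropWhile pvBlank (List.dropWhile pvBlank u)) := by
            unfold pvHitR
            rw [if_pos ⟨Or.inl rfl, rfl⟩,
              show ((' ' :: u : List Char).drop 1) = u from rfl, if_neg hz2]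
          rw [hw, hpR]
          have hst1 : List.isPrefixOf ['=', ' ']
              ('=' :: ' ' :: List.rdropWhile pvBlank u) = true := by
            simp [List.isPrefixOf]
          have hst2 : List.isPrefixOf ['=', '=', ' ']
              ('=' :: ' ' :: List.rdropWhile pvBlank u) = false := by
            simp [List.isPrefixOf]
          simp only [PySem.Chars.startswith, List.replicate, List.cons_append,
            List.nil_append, hst1, hst2, Bool.not_false, Bool.and_true, if_true]
          rw [show List.drop 2 ('=' :: ' ' :: List.rdropWhile pvBlank u)
            = List.rdropWhile pvBlank u from rfl, hstrip]
      · have hnsp : (List.rdropWhile pvBlank (c :: u)).head? ≠ some ' ' := by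
          rcases rdrop_head (c :: u) with h | h
          · rw [h]; simp
          · rw [h]
            intro hcon
            exact hcsp (Option.some.inj hcon)
        have h1 : List.isPrefixOf [' '] (List.rdropWhile pvBlank (c :: u)) = false :=
          isPrefixOf_false_of_head _ _ _ hnsp
        have h2 : List.isPrefixOf ['=', ' '] (List.rdropWhile pvBlank (c :: u)) = false :=
          isPrefixOf_false_of_head _ _ _ hwne
        have hpR : pvHitR (0 + 1) (c :: u) = none := by
          unfold pvHitR
          rw [if_neg (by rintro ⟨-, hc⟩; exact hcsp (Option.some.inj hc))]
        rw [hpR]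
        simp [PySem.Chars.startswith, List.isPrefixOf, List.replicate, h1, h2]
  · -- d = 2
    cases rest with
    | nil =>
      have hpR : pvHitR (0 + 1 + 1) ([] : List Char) = none := by
        unfold pvHitR
        rw [if_neg (by rintro ⟨-, hc⟩; simp at hc)]
      rw [hpR]
      simp [PySem.Chars.startswith, List.isPrefixOf, List.rdropWhile, List.replicate]
    | cons c u =>
      by_cases hcsp : c = ' '
      · subst hcsp
        by_cases hz : List.rdropWhile pvBlank u = []
        · have hw : List.rdropWhile pvBlank (' ' :: u) = [] := by
            rw [rdropWhile_cons_pos _ _ _ (by decide), if_pos hz]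
          have hz2 : List.rdropWhile pvBlank (List.dropWhile pvBlank u) = [] :=
            (rdrop_dropWhile_nil_iff pvBlank u).mpr hz
          have hpR : pvHitR (0 + 1 + 1) (' ' :: u) = none := by
            unfold pvHitR
            rw [if_pos ⟨Or.inr rfl, rfl⟩,
              show ((' ' :: u : List Char).drop 1) = u from rfl, if_pos hz2]
          rw [hw, hpR]
          simp [PySem.Chars.startswith, List.isPrefixOf, List.replicate]
        · have hw : List.rdropWhile pvBlank (' ' :: u) = ' ' :: List.rdropWhile pvBlank u := by
            rw [rdropWhile_cons_pos _ _ _ (by decide), if_neg hz]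
          have hz2 : List.rdropWhile pvBlank (List.dropWhile pvBlank u) ≠ [] :=
            fun hc => hz ((rdrop_dropWhile_nil_iff pvBlank u).mp hc)
          have hstrip : PySem.Chars.strip (List.rdropWhile pvBlank u)
              = List.rdropWhile pvBlank (List.dropWhile pvBlank u) := by
            rw [strip_dom _ (fun a ha => hdm a
                (List.mem_cons_of_mem _ ((List.rdropWhile_prefix _ _).subset ha)))
              (fun ha => hnlm
                (List.mem_cons_of_mem _ ((List.rdropWhile_prefix _ _).subset ha)))]
            rw [rdropWhile_dropWhile_comm, rdropWhile_idem]
          have hpR : pvHitR (0 + 1 + 1) (' ' :: u)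
              = some (List.rdropWhile pvBlank (List.dropWhile pvBlank u)) := by
            unfold pvHitR
            rw [if_pos ⟨Or.inr rfl, rfl⟩,
              show ((' ' :: u : List Char).drop 1) = u from rfl, if_neg hz2]
          rw [hw, hpR]
          have hst1 : List.isPrefixOf ['=', ' ']
              ('=' :: '=' :: ' ' :: List.rdropWhile pvBlank u) = false := by
            simp [List.isPrefixOf]
          have hst2 : List.isPrefixOf ['=', '=', ' ']
              ('=' :: '=' :: ' ' :: List.rdropWhile pvBlank u) = true := by
            simp [List.isPrefixOf]
          simp only [PySem.Chars.startswith, List.replicate, List.cons_append,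
            List.nil_append, hst1, hst2, Bool.false_and, Bool.false_eq_true, if_false,
            if_true]
          rw [show List.drop 3 ('=' :: '=' :: ' ' :: List.rdropWhile pvBlank u)
            = List.rdropWhile pvBlank u from rfl, hstrip]
      · have hnsp : (List.rdropWhile pvBlank (c :: u)).head? ≠ some ' ' := by
          rcases rdrop_head (c :: u) with h | h
          · rw [h]; simp
          · rw [h]
            intro hcon
            exact hcsp (Option.some.inj hcon)
        have h1 : List.isPrefixOf [' '] (List.rdropWhile pvBlank (c :: u)) = false :=
          isPrefixOf_false_of_head _ _ _ hnsp
        have hpR : pvHitR (0 + 1 + 1) (c :: u) = none := by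
          unfold pvHitR
          rw [if_neg (by rintro ⟨-, hc⟩; exact hcsp (Option.some.inj hc))]
        rw [hpR]
        simp [PySem.Chars.startswith, List.isPrefixOf, List.replicate, h1]
  · -- d ≥ 3 : three leading '='s, neither test can match
    have hpR : pvHitR (d3 + 1 + 1 + 1) rest = none := by
      unfold pvHitR
      rw [if_neg (by rintro ⟨h | h, -⟩ <;> omega)]
    rw [hpR]
    simp [PySem.Chars.startswith, List.isPrefixOf, List.replicate]

-- A's per-line verdict equals pvHitM of the lstripped line
theorem pvLineHit_eq (l : List Char) (hd : ∀ c ∈ l, pvDomChar c = true) (hnl : '\n' ∉ l) :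
    pvLineHit l = pvHitM (l.dropWhile pvBlank) := by
  have hdm : ∀ c ∈ l.dropWhile pvBlank, pvDomChar c = true :=
    fun c hc => hd c ((List.dropWhile_sublist _).subset hc)
  have hnlm : '\n' ∉ l.dropWhile pvBlank :=
    fun hc => hnl ((List.dropWhile_sublist _).subset hc)
  have hdec2 : l.dropWhile pvBlank
      = List.replicate ((l.dropWhile pvBlank).takeWhile (fun c => c == '=')).length '='
        ++ (l.dropWhile pvBlank).dropWhile (fun c => c == '=') := by
    conv_lhs => rw [← List.takeWhile_append_dropWhile (p := fun c => c == '=')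
      (l := l.dropWhile pvBlank)]
    congr 1
    refine List.eq_replicate_iff.mpr ⟨rfl, fun b hb => ?_⟩
    simpa using List.mem_takeWhile_imp hb
  have hrh : ∀ a, ((l.dropWhile pvBlank).dropWhile (fun c => c == '=')).head? = some a
      → (a == '=') = false := fun a ha => head_dropWhile_neg _ _ a ha
  have hdmr : ∀ c ∈ (l.dropWhile pvBlank).dropWhile (fun c => c == '='), pvDomChar c = true :=
    fun c hc => hdm c ((List.dropWhile_sublist _).subset hc)
  have hnlr : '\n' ∉ (l.dropWhile pvBlank).dropWhile (fun c => c == '=') :=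
    fun hc => hnlm ((List.dropWhile_sublist _).subset hc)
  unfold pvLineHit
  rw [strip_dom l hd hnl]
  conv_lhs => rw [hdec2]
  rw [rdropWhile_append_of_neg _ _ _ (by
    intro a ha
    rw [List.eq_of_mem_replicate ha]
    decide)]
  rw [hitM_split _ _ hdmr hnlr hrh]
  exact (pvHitM_eq_R' (l.dropWhile pvBlank)).symm

-- B's scan on one line (plus the remaining content) takes the same verdict
theorem pvScanB_line_core (w : List Char) (d : Nat) (rest tail : List Char)
    (hwb : ∀ a ∈ w, pvBlank a = true)
    (hrh : ∀ a, rest.head? = some a → (a == '=') = false)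
    (hm0 : d = 0 → ∀ a, rest.head? = some a → pvBlank a = false)
    (hnlr : '\n' ∉ rest)
    (ht : tail = [] ∨ tail.head? = some '\n') :
    pvScanB ((w ++ (List.replicate d '=' ++ rest)) ++ tail) 0 =
      match pvHitR d rest with
      | some z => some z
      | none =>
        if tail = [] then none
        else pvScanB ((w ++ (List.replicate d '=' ++ rest)) ++ tail)
              ((w ++ (List.replicate d '=' ++ rest)).length + 1) := by
  have hwnl : '\n' ∉ w := by
    intro hc
    have := hwb '\n' hc
    simp [pvBlank] at this
  have htb : tail.takeWhile pvBlank = [] := by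
    rcases ht with h | h
    · simp [h]
    · cases tail with
      | nil => rfl
      | cons a r =>
        have ha : a = '\n' := by simpa using h
        subst ha
        rw [List.takeWhile_cons_of_neg (by decide)]
  have hte : tail.takeWhile (fun c => c == '=') = [] := by
    rcases ht with h | h
    · simp [h]
    · cases tail with
      | nil => rfl
      | cons a r =>
        have ha : a = '\n' := by simpa using h
        subst ha
        rw [List.takeWhile_cons_of_neg (by decide)]
  have htn : tail.takeWhile (fun c => c != '\n') = [] := by
    rcases ht with h | h
    · simp [h]
    · cases tail with
      | nil => rfl
      | cons a r =>
        have ha : a = '\n' := by simpa using h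
        subst ha
        rw [List.takeWhile_cons_of_neg (by decide)]
  -- j = w.length
  have h_j : pvSkipBlank ((w ++ (List.replicate d '=' ++ rest)) ++ tail)
      ((w ++ (List.replicate d '=' ++ rest)) ++ tail).length 0 = w.length := by
    rw [pvSkipBlank_spec]
    simp only [List.drop_zero, Nat.sub_zero, List.take_length]
    have htw : ((w ++ (List.replicate d '=' ++ rest)) ++ tail).takeWhile pvBlank = w := by
      rw [List.append_assoc, List.takeWhile_append_of_pos hwb]
      rcases d with _ | d'
      · simp only [List.replicate_zero, List.nil_append]
        cases rest with
        | nil =>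
          simp [htb]
        | cons c u =>
          have hc := hm0 rfl c rfl
          rw [List.cons_append, List.takeWhile_cons_of_neg (by simp [hc])]
          simp
      · rw [List.replicate_succ]
        simp only [List.cons_append, List.append_assoc]
        rw [List.takeWhile_cons_of_neg (by decide)]
        simp
    rw [htw]
    omega
  -- k = w.length + d
  have h_k : pvEqRun ((w ++ (List.replicate d '=' ++ rest)) ++ tail) w.length
      = w.length + d := by
    rw [pvEqRun_spec]
    congr 1
    have hdw : ((w ++ (List.replicate d '=' ++ rest)) ++ tail).drop w.length
        = (List.replicate d '=' ++ rest) ++ tail := by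
      rw [List.append_assoc, List.drop_left]
    rw [hdw, List.append_assoc, List.takeWhile_append_of_pos (by
      intro a ha
      simp [List.eq_of_mem_replicate ha])]
    cases rest with
    | nil =>
      simp [hte]
    | cons c u =>
      have hc := hrh c rfl
      rw [List.cons_append, List.takeWhile_cons_of_neg (by simp [hc])]
      simp
  -- the character after the run
  have h_get : ((w ++ (List.replicate d '=' ++ rest)) ++ tail)[w.length + d]?
      = (rest ++ tail).head? := by
    have h1 : (w ++ (List.replicate d '=' ++ rest)) ++ tail
        = (w ++ List.replicate d '=') ++ (rest ++ tail) := by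
      simp [List.append_assoc]
    rw [h1, List.getElem?_append_right (by simp)]
    have h2 : w.length + d - (w ++ List.replicate d '=').length = 0 := by simp
    rw [h2]
    simp [List.head?_eq_getElem?]
  have h_drop_k : ((w ++ (List.replicate d '=' ++ rest)) ++ tail).drop (w.length + d)
      = rest ++ tail := by
    have h1 : (w ++ (List.replicate d '=' ++ rest)) ++ tail
        = (w ++ List.replicate d '=') ++ (rest ++ tail) := by
      simp [List.append_assoc]
    have h2 : w.length + d = (w ++ List.replicate d '=').length := by simp
    rw [h1, h2, List.drop_left]
  -- findNl from 0 is the line length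
  have h_i0 : pvFindNl ((w ++ (List.replicate d '=' ++ rest)) ++ tail) 0
      = (w ++ (List.replicate d '=' ++ rest)).length := by
    rw [pvFindNl_spec]
    simp only [List.drop_zero, Nat.zero_add]
    rw [List.takeWhile_append_of_pos (by
      intro a ha
      have hane : a ≠ '\n' := by
        rcases List.mem_append.mp ha with h | h
        · exact fun hcon => hwnl (hcon ▸ h)
        · rcases List.mem_append.mp h with h2 | h2
          · rw [List.eq_of_mem_replicate h2]; decide
          · exact fun hcon => hnlr (hcon ▸ h2)
      simpa using hane)]
    rw [htn]
    simp
  rw [pvScanB.eq_def ((w ++ (List.replicate d '=' ++ rest)) ++ tail) 0]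
  dsimp only
  rw [h_j, h_k]
  simp only [Nat.add_sub_cancel_left, h_get, h_i0]
  by_cases hcond : ((d = 1 ∨ d = 2) ∧ rest.head? = some ' ')
  · -- a marker line: rest = ' ' :: u
    obtain ⟨hd12, hsp⟩ := hcond
    obtain ⟨u, hu⟩ : ∃ u, rest = ' ' :: u := by
      cases rest with
      | nil => simp at hsp
      | cons c u =>
        exact ⟨u, by rw [(Option.some.inj (by simpa using hsp) : c = ' ')]⟩
    have hru : rest.drop 1 = u := by rw [hu]; simp
    have hbool : ((d == 1 || d == 2) && ((rest ++ tail).head? == some ' ')) = true := by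
      rw [hu]
      rcases hd12 with h | h <;> subst h <;> simp
    rw [if_pos hbool]
    have h_endl : pvFindNl ((w ++ (List.replicate d '=' ++ rest)) ++ tail) (w.length + d)
        = (w ++ (List.replicate d '=' ++ rest)).length := by
      rw [pvFindNl_spec, h_drop_k]
      rw [List.takeWhile_append_of_pos (by
        intro a ha
        have hne : a ≠ '\n' := fun hcon => hnlr (hcon ▸ ha)
        simpa using hne)]
      rw [htn]
      simp [List.length_append]
      omega
    rw [h_endl]
    have h_drop_k1 : ((w ++ (List.replicate d '=' ++ rest)) ++ tail).drop (w.length + d + 1)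
        = u ++ tail := by
      have h3 := congrArg (List.drop 1) h_drop_k
      rw [List.drop_drop] at h3
      have h4 : List.drop 1 (rest ++ tail) = u ++ tail := by rw [hu]; simp
      rw [h4] at h3
      rw [← h3]
    have hlinelen : (w ++ (List.replicate d '=' ++ rest)).length
        = w.length + d + 1 + u.length := by
      rw [hu]
      simp only [List.length_append, List.length_cons, List.length_replicate]
      omega
    have h_e : pvSkipBlank ((w ++ (List.replicate d '=' ++ rest)) ++ tail)
        (w ++ (List.replicate d '=' ++ rest)).length (w.length + d + 1)
        = w.length + d + 1 + (u.takeWhile pvBlank).length := by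
      rw [pvSkipBlank_spec, h_drop_k1]
      have hcount : (w ++ (List.replicate d '=' ++ rest)).length - (w.length + d + 1)
          = u.length := by
        rw [hlinelen]
        omega
      rw [hcount, List.take_left]
    rw [h_e]
    have h_line_drop : (w ++ (List.replicate d '=' ++ rest)).drop
        (w.length + d + 1 + (u.takeWhile pvBlank).length) = List.dropWhile pvBlank u := by
      rw [hu]
      have h1 : w ++ (List.replicate d '=' ++ (' ' :: u))
          = (w ++ (List.replicate d '=' ++ [' '])) ++ u := by
        simp
      have h5 : w.length + d + 1 + (u.takeWhile pvBlank).length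
          = (w ++ (List.replicate d '=' ++ [' '])).length + (u.takeWhile pvBlank).length := by
        simp only [List.length_append, List.length_cons, List.length_nil,
          List.length_replicate]
        omega
      rw [h1, h5, drop_append_left_plus, drop_takeWhile_length]
    have hzle : (List.rdropWhile pvBlank (List.dropWhile pvBlank u)).length
        ≤ (List.dropWhile pvBlank u).length :=
      (List.rdropWhile_prefix _ _).length_le
    have htwle : (u.takeWhile pvBlank).length ≤ u.length := takeWhile_length_le _ _
    have hdwlen : (List.dropWhile pvBlank u).length
        = u.length - (u.takeWhile pvBlank).length := by
      rw [← drop_takeWhile_length pvBlank u]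
      simp
    have h_t : pvTrimBack ((w ++ (List.replicate d '=' ++ rest)) ++ tail)
        (w.length + d + 1 + (u.takeWhile pvBlank).length)
        (w ++ (List.replicate d '=' ++ rest)).length
        = w.length + d + 1 + (u.takeWhile pvBlank).length
          + (List.rdropWhile pvBlank (List.dropWhile pvBlank u)).length := by
      rw [pvTrimBack_spec _ _ _ (by simp [List.length_append])
        (by rw [hlinelen]; omega)]
      rw [List.take_left, h_line_drop]
    rw [h_t]
    have hR : ∀ _hz : List.rdropWhile pvBlank (List.dropWhile pvBlank u) = [],
        pvHitR d rest = none := by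
      intro hz
      unfold pvHitR
      rw [if_pos ⟨hd12, hsp⟩, hru, if_pos hz]
    have hRne : ∀ _hz : List.rdropWhile pvBlank (List.dropWhile pvBlank u) ≠ [],
        pvHitR d rest = some (List.rdropWhile pvBlank (List.dropWhile pvBlank u)) := by
      intro hz
      unfold pvHitR
      rw [if_pos ⟨hd12, hsp⟩, hru, if_neg hz]
    by_cases hz : List.rdropWhile pvBlank (List.dropWhile pvBlank u) = []
    · rw [hz]
      simp only [List.length_nil, Nat.add_zero]
      rw [if_neg (Nat.lt_irrefl _)]
      dsimp only
      rw [hR hz]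
      dsimp only
      rcases ht with htail | htail
      · subst htail
        rw [dif_neg (by simp)]
        simp
      · have htne : tail ≠ [] := by
          intro hcon; rw [hcon] at htail; simp at htail
        rw [dif_pos (by
          simp only [List.length_append]
          cases tail with
          | nil => exact absurd rfl htne
          | cons a r =>
            simp only [List.length_cons]
            omega)]
        rw [if_neg htne]
    · have hzpos : 0 < (List.rdropWhile pvBlank (List.dropWhile pvBlank u)).length :=
        List.length_pos_iff.mpr hz
      rw [if_pos (by omega)]
      have h_slice : PySem.List.slice ((w ++ (List.replicate d '=' ++ rest)) ++ tail)
          (some ((w.length + d + 1 + (u.takeWhile pvBlank).length : Nat) : Int))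
          (some ((w.length + d + 1 + (u.takeWhile pvBlank).length
            + (List.rdropWhile pvBlank (List.dropWhile pvBlank u)).length : Nat) : Int))
          = List.rdropWhile pvBlank (List.dropWhile pvBlank u) := by
        rw [PySem.List.slice_natCast]
        have hc1 : w.length + d + 1 + (u.takeWhile pvBlank).length
            + (List.rdropWhile pvBlank (List.dropWhile pvBlank u)).length
            - (w.length + d + 1 + (u.takeWhile pvBlank).length)
            = (List.rdropWhile pvBlank (List.dropWhile pvBlank u)).length := by omega
        rw [hc1]
        have hdropcs : ((w ++ (List.replicate d '=' ++ rest)) ++ tail).drop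
            (w.length + d + 1 + (u.takeWhile pvBlank).length)
            = List.dropWhile pvBlank u ++ tail := by
          rw [List.drop_append_of_le_length (by rw [hlinelen]; omega), h_line_drop]
        rw [hdropcs, List.take_append]
        rw [show (List.rdropWhile pvBlank (List.dropWhile pvBlank u)).length
          - (List.dropWhile pvBlank u).length = 0 from by omega]
        rw [List.take_zero, List.append_nil]
        exact (List.prefix_iff_eq_take.mp (List.rdropWhile_prefix _ _)).symm
      rw [h_slice]
      dsimp only
      rw [hRne hz]
  · -- no marker on this line
    have hbool : ((d == 1 || d == 2) && ((rest ++ tail).head? == some ' ')) = false := by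
      cases hbv : ((d == 1 || d == 2) && ((rest ++ tail).head? == some ' ')) with
      | false => rfl
      | true =>
        exfalso
        apply hcond
        have hb := (Bool.and_eq_true _ _).mp hbv
        have hhh : (rest ++ tail).head? = some ' ' := by simpa using hb.2
        refine ⟨?_, ?_⟩
        · rcases (Bool.or_eq_true _ _).mp hb.1 with h | h
          · exact Or.inl (by simpa using h)
          · exact Or.inr (by simpa using h)
        · cases rest with
          | cons c u => simpa using hhh
          | nil =>
            simp only [List.nil_append] at hhh
            exfalso
            rcases ht with h | h
            · rw [h] at hhh; simp at hhh
            · rw [h] at hhh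
              exact absurd (Option.some.inj hhh) (by decide)
    rw [hbool]
    simp only [Bool.false_eq_true, if_false]
    have hRn : pvHitR d rest = none := by
      unfold pvHitR
      rw [if_neg hcond]
    rw [hRn]
    dsimp only
    rcases ht with htail | htail
    · subst htail
      rw [dif_neg (by simp)]
      simp
    · have htne : tail ≠ [] := by
        intro hcon; rw [hcon] at htail; simp at htail
      rw [dif_pos (by
        simp only [List.length_append]
        cases tail with
        | nil => exact absurd rfl htne
        | cons a r =>
          simp only [List.length_cons]
          omega)]
      rw [if_neg htne]

theorem pvScanB_line (l tail : List Char) (hnl : '\n' ∉ l)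
    (ht : tail = [] ∨ tail.head? = some '\n') :
    pvScanB (l ++ tail) 0 =
      match pvHitM (l.dropWhile pvBlank) with
      | some z => some z
      | none => if tail = [] then none else pvScanB (l ++ tail) (l.length + 1) := by
  have hdec1 : l = l.takeWhile pvBlank ++ l.dropWhile pvBlank :=
    List.takeWhile_append_dropWhile.symm
  have hdec2 : l.dropWhile pvBlank
      = List.replicate ((l.dropWhile pvBlank).takeWhile (fun c => c == '=')).length '='
        ++ (l.dropWhile pvBlank).dropWhile (fun c => c == '=') := by
    conv_lhs => rw [← List.takeWhile_append_dropWhile (p := fun c => c == '=')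
      (l := l.dropWhile pvBlank)]
    congr 1
    refine List.eq_replicate_iff.mpr ⟨rfl, fun b hb => ?_⟩
    simpa using List.mem_takeWhile_imp hb
  have hwb : ∀ a ∈ l.takeWhile pvBlank, pvBlank a = true :=
    fun a ha => List.mem_takeWhile_imp ha
  have hrh : ∀ a, ((l.dropWhile pvBlank).dropWhile (fun c => c == '=')).head? = some a
      → (a == '=') = false := fun a ha => head_dropWhile_neg _ _ a ha
  have hm0 : ((l.dropWhile pvBlank).takeWhile (fun c => c == '=')).length = 0
      → ∀ a, ((l.dropWhile pvBlank).dropWhile (fun c => c == '=')).head? = some a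
        → pvBlank a = false := by
    intro h0 a ha
    have hdwid : (l.dropWhile pvBlank).dropWhile (fun c => c == '=')
        = l.dropWhile pvBlank := by
      cases hm : l.dropWhile pvBlank with
      | nil => simp
      | cons c uu =>
        rw [hm] at h0
        have hcne : ¬ ((c == '=') = true) := by
          intro hc
          rw [List.takeWhile_cons_of_pos (p := fun x => x == '=') (l := uu) (a := c) hc] at h0
          simp at h0
        rw [List.dropWhile_cons_of_neg (p := fun x => x == '=') (l := uu) (a := c) hcne]
    rw [hdwid] at ha
    exact head_dropWhile_neg pvBlank l a ha
  have hnlr : '\n' ∉ (l.dropWhile pvBlank).dropWhile (fun c => c == '=') :=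
    fun hin => hnl ((List.dropWhile_sublist _).subset ((List.dropWhile_sublist _).subset hin))
  have hcore := pvScanB_line_core (l.takeWhile pvBlank)
    (((l.dropWhile pvBlank).takeWhile (fun c => c == '=')).length)
    ((l.dropWhile pvBlank).dropWhile (fun c => c == '=')) tail hwb hrh hm0 hnlr ht
  rw [← hdec2, ← hdec1] at hcore
  rw [hcore, pvHitM_eq_R' (l.dropWhile pvBlank)]

-- ---- content.split('\n') as a structural recursion ----

def pvLines : List Char → List (List Char)
  | [] => [[]]
  | c :: r =>
    let ls := pvLines r
    if c = '\n' then [] :: ls else (c :: ls.headI) :: ls.tail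

theorem pvLines_ne_nil (cs : List Char) : pvLines cs ≠ [] := by
  cases cs with
  | nil => simp [pvLines]
  | cons c r =>
    simp only [pvLines]
    split <;> simp

theorem splitOn_go_spec (fuel : Nat) :
    ∀ (l cur : List Char) (acc : List (List Char)), l.length < fuel →
      PySem.Chars.splitOn.go ['\n'] fuel l cur acc
        = acc.reverse ++ List.modifyHead (fun s => cur.reverse ++ s) (pvLines l) := by
  induction fuel with
  | zero => intro l cur acc h; omega
  | succ f ih =>
    intro l cur acc h
    cases l with
    | nil =>
      rw [PySem.Chars.splitOn.go]
      simp [pvLines, List.modifyHead]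
      all_goals omega
    | cons c rest =>
      by_cases hc : c = '\n'
      · subst hc
        have hpre : List.isPrefixOf ['\n'] ('\n' :: rest) = true := by
          simp [List.isPrefixOf]
        rw [PySem.Chars.splitOn.go]
        simp only [hpre, if_pos]
        rw [show List.drop (['\n'] : List Char).length ('\n' :: rest) = rest from rfl]
        rw [ih rest [] (cur.reverse :: acc) (by simpa using Nat.lt_of_succ_lt_succ h)]
        obtain ⟨hd0, tl0, hrep⟩ := List.exists_cons_of_ne_nil (pvLines_ne_nil rest)
        simp [pvLines, hrep, List.modifyHead]
      · have hpre : List.isPrefixOf ['\n'] (c :: rest) = false := by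
          have hx : ('\n' == c) = false := by simpa using (Ne.symm hc)
          simp [List.isPrefixOf, hx]
        rw [PySem.Chars.splitOn.go]
        simp only [hpre, Bool.false_eq_true, if_false]
        rw [ih rest (c :: cur) acc (by simpa using Nat.lt_of_succ_lt_succ h)]
        obtain ⟨hd0, tl0, hrep⟩ := List.exists_cons_of_ne_nil (pvLines_ne_nil rest)
        simp [pvLines, hrep, List.modifyHead, hc]

theorem splitOn_eq_pvLines (cs : List Char) :
    PySem.Chars.splitOn cs ['\n'] = pvLines cs := by
  unfold PySem.Chars.splitOn
  rw [splitOn_go_spec (cs.length + 1) cs [] [] (by omega)]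
  obtain ⟨hd0, tl0, hrep⟩ := List.exists_cons_of_ne_nil (pvLines_ne_nil cs)
  simp [hrep, List.modifyHead]

theorem pvLines_no_nl (l : List Char) (hnl : '\n' ∉ l) : pvLines l = [l] := by
  induction l with
  | nil => rfl
  | cons c r ih =>
    have hc : c ≠ '\n' := fun h => hnl (h ▸ List.mem_cons_self ..)
    have hr : '\n' ∉ r := fun h => hnl (List.mem_cons_of_mem _ h)
    simp only [pvLines, ih hr, if_neg hc]
    rfl

theorem pvLines_break (l r : List Char) (hnl : '\n' ∉ l) :
    pvLines (l ++ '\n' :: r) = l :: pvLines r := by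
  induction l with
  | nil => simp [pvLines]
  | cons c l' ih =>
    have hc : c ≠ '\n' := fun h => hnl (h ▸ List.mem_cons_self ..)
    have hl' : '\n' ∉ l' := fun h => hnl (List.mem_cons_of_mem _ h)
    simp only [List.cons_append, pvLines, ih hl', if_neg hc]
    rfl

-- ---- the two sides agree ----

theorem scan_eq_loopC (cs : List Char) (hd : ∀ c ∈ cs, pvDomChar c = true) :
    pvScanB cs 0 = pvLoopC (pvLines cs) := by
  by_cases hmem : '\n' ∈ cs
  · have hdw : cs.dropWhile (fun c => c != '\n') ≠ [] := by
      intro hnil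
      have hall := List.dropWhile_eq_nil_iff.mp hnil
      have := hall '\n' hmem
      simp at this
    obtain ⟨b, r, hbr⟩ := List.exists_cons_of_ne_nil hdw
    have hb : b = '\n' := by
      have hh := head_dropWhile_neg (fun c => c != '\n') cs b (by rw [hbr]; rfl)
      simpa using hh
    subst hb
    have hcs : cs = cs.takeWhile (fun c => c != '\n') ++ '\n' :: r := by
      conv_lhs => rw [← List.takeWhile_append_dropWhile (p := fun c => c != '\n') (l := cs)]
      rw [hbr]
    have hnl : '\n' ∉ cs.takeWhile (fun c => c != '\n') := by
      intro hin
      have := List.mem_takeWhile_imp hin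
      simp at this
    have hdsub : ∀ c ∈ cs.takeWhile (fun c => c != '\n'), pvDomChar c = true :=
      fun c hc => hd c ((List.takeWhile_prefix _).subset hc)
    have hdr : ∀ c ∈ r, pvDomChar c = true := by
      intro c hc
      apply hd c
      rw [hcs]
      exact List.mem_append.mpr (Or.inr (List.mem_cons_of_mem _ hc))
    have hline := pvScanB_line (cs.takeWhile (fun c => c != '\n')) ('\n' :: r) hnl (Or.inr rfl)
    rw [← hcs] at hline
    rw [hline, ← pvLineHit_eq _ hdsub hnl]
    conv_rhs => rw [hcs]
    rw [pvLines_break _ _ hnl]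
    have hshift := pvScanB_shift ((cs.takeWhile fun c => c != '\n') ++ ['\n']) r 0
    have hshift' : pvScanB cs ((cs.takeWhile fun c => c != '\n').length + 1)
        = pvScanB r 0 := by
      have hs2 : pvScanB ((cs.takeWhile fun c => c != '\n') ++ '\n' :: r)
          ((cs.takeWhile fun c => c != '\n').length + 1) = pvScanB r 0 := by
        simpa [List.append_assoc, List.length_append] using hshift
      rw [← hcs] at hs2
      exact hs2
    cases hlh : pvLineHit (cs.takeWhile (fun c => c != '\n')) with
    | some t => simp [pvLoopC, hlh]
    | none =>
      simp only [pvLoopC, hlh]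
      rw [if_neg (by simp), hshift']
      exact scan_eq_loopC r hdr
  · rw [pvLines_no_nl cs hmem]
    have h0 := pvScanB_line cs [] hmem (Or.inl rfl)
    rw [List.append_nil] at h0
    rw [h0, ← pvLineHit_eq cs hd hmem]
    cases hlh : pvLineHit cs <;> simp [pvLoopC, hlh]
termination_by cs.length
decreasing_by
  rw [hcs]
  simp only [List.length_append, List.length_cons]
  omega

set_option maxHeartbeats 1000000 in
theorem loopA_eq (lines : List String) (fb : String) :
    pvLinesLoopA lines fb =
      match pvLoopC (lines.map String.toList) with
      | some t => String.ofList t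
      | none => pvTitle (PySem.Str.replace fb "-" " ") := by
  induction lines with
  | nil => simp [pvLinesLoopA, pvLoopC]
  | cons line lines ih =>
    have htl2 : ("= " : String).toList = ['=', ' '] := by decide
    have htl3 : ("== " : String).toList = ['=', '=', ' '] := by decide
    have h1 : PySem.Str.startswith (PySem.Str.strip line) "= "
        = PySem.Chars.startswith (PySem.Chars.strip line.toList) ['=', ' '] := by
      rw [PySem.Str.startswith_eq, PySem.Str.toList_strip, htl2]
    have h2 : PySem.Str.startswith (PySem.Str.strip line) "== "
        = PySem.Chars.startswith (PySem.Chars.strip line.toList) ['=', '=', ' '] := by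
      rw [PySem.Str.startswith_eq, PySem.Str.toList_strip, htl3]
    have h3 : PySem.Str.strip (PySem.Str.slice (PySem.Str.strip line) (some 2) none)
        = String.ofList (PySem.Chars.strip ((PySem.Chars.strip line.toList).drop 2)) := by
      apply String.toList_inj.mp
      rw [PySem.Str.toList_strip, PySem.Str.toList_slice, PySem.Str.toList_strip,
        String.toList_ofList, PySem.Chars.slice_eq_listSlice,
        PySem.List.slice_from _ (by norm_num)]
      simp
    have h4 : PySem.Str.strip (PySem.Str.slice (PySem.Str.strip line) (some 3) none)
        = String.ofList (PySem.Chars.strip ((PySem.Chars.strip line.toList).drop 3)) := by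
      apply String.toList_inj.mp
      rw [PySem.Str.toList_strip, PySem.Str.toList_slice, PySem.Str.toList_strip,
        String.toList_ofList, PySem.Chars.slice_eq_listSlice,
        PySem.List.slice_from _ (by norm_num)]
      simp
    simp only [pvLinesLoopA, List.map_cons, pvLoopC, pvLineHit, h1, h2]
    by_cases hb1 : PySem.Chars.startswith (PySem.Chars.strip line.toList) ['=', ' '] = true <;>
      by_cases hb2 : PySem.Chars.startswith (PySem.Chars.strip line.toList) ['=', '=', ' '] = true <;>
      simp [hb1, hb2, h3, h4, ih, Bool.not_eq_true]

-- ===== VERDICT (by name: the statement is the Claim_ definition above) =====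
set_option maxHeartbeats 1000000 in
theorem extract_adoc_title_py_spec : Claim_equal_extract_adoc_title_py := by
  unfold Claim_equal_extract_adoc_title_py
  intro content fallback hdom
  unfold Spec_extract_adoc_title_py
  have hd : ∀ c ∈ content.toList, pvDomChar c = true := by
    have h1 : pvDomStr content = true := by
      unfold Dom_extract_adoc_title_py at hdom
      exact ((Bool.and_eq_true _ _).mp hdom).1
    simpa [pvDomStr, List.all_eq_true] using h1
  unfold extract_adoc_title_py extract_adoc_title_py_alt
  have hsm := PySem.Str.split?_map content "\n"
  have hsep : ("\n" : String).toList = ['\n'] := by decide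
  rw [hsep] at hsm
  have hs' : PySem.Chars.split? content.toList ['\n']
      = some (PySem.Chars.splitOn content.toList ['\n']) := by
    unfold PySem.Chars.split?
    simp
  rw [hs'] at hsm
  cases hsp : PySem.Str.split? content "\n" with
  | none => rw [hsp] at hsm; simp at hsm
  | some lines =>
    rw [hsp] at hsm
    simp only [Option.map_some] at hsm
    have hlines : lines.map String.toList = PySem.Chars.splitOn content.toList ['\n'] :=
      Option.some.inj hsm
    simp only [Option.getD_some]
    rw [loopA_eq lines fallback, hlines, splitOn_eq_pvLines,
      ← scan_eq_loopC content.toList hd]
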